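-- pv_equiv track=rewrite | github.com/tigantic/physics-os | FRONTIER/07_GENOMICS/crispr_guide.py | _matches_pam
-- ===== SOURCE A (Python) =====
-- def _matches_pam(sequence: str, pattern: str) -> bool:
--     """Check if sequence matches PAM pattern."""
--     if len(sequence) != len(pattern):
--         return False
--
--     for s, p in zip(sequence.upper(), pattern):
--         if p == 'N':
--             continue
--         elif p == 'R' and s not in 'AG':
--             return False
--         elif p == 'V' and s not in 'ACG':
--             return False
--         elif p not in 'NRVW' and s != p:
--             return False
--
--     return True
-- ===== SOURCE B (Python) =====
-- def _matches_pam(sequence, pattern):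
--     if len(sequence) != len(pattern):
--         return False
--     # Group the sequence characters by the pattern symbol they must satisfy,
--     # then validate each distinct symbol's character set once.
--     groups = {}
--     for p, s in zip(pattern, sequence.upper()):
--         groups.setdefault(p, set()).add(s)
--     for p, seen in groups.items():
--         if p == 'R':
--             if not seen <= set('AG'):
--                 return False
--         elif p == 'V':
--             if not seen <= set('ACG'):
--                 return False
--         elif p not in 'NW':
--             if seen != {p}:
--                 return False
--     return True
-- ===== Notes on version B (the rewrite author's own statement) =====
-- stated objective: alternative
-- what changed: Instead of A's per-position early-return scan, B first groups the uppercased sequence characters by pattern symbol into a dict of sets, then validates each DISTINCT symbol's set once with set subset/equality checks (R-set <= {A,G}, V-set <= {A,C,G}, exact symbols must give the singleton {p}).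
import Mathlib
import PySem

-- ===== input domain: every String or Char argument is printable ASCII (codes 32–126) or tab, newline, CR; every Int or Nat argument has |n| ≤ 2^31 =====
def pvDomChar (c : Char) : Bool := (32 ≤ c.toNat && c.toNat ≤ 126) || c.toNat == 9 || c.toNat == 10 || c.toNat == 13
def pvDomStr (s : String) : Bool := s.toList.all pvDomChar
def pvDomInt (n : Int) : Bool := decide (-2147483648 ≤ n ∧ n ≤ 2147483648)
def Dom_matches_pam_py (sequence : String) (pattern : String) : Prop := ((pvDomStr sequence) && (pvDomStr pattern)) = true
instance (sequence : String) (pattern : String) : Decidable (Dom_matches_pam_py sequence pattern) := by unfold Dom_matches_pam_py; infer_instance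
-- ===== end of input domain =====

-- B replaces A's per-position early-return scan by grouping the sequence characters per
-- pattern symbol (a dict of sets) and validating each distinct symbol's set once: alternative, same cost.

-- ===== PORT A =====
-- the for-loop with early returns, over zip(sequence.upper(), pattern)
def pamLoopA : List (Char × Char) → Bool
  | [] => true
  | (s, p) :: rest =>
    if p == 'N' then pamLoopA rest
    else if p == 'R' && !(PySem.Str.isIn (String.ofList [s]) "AG") then false
    else if p == 'V' && !(PySem.Str.isIn (String.ofList [s]) "ACG") then false
    else if !(PySem.Str.isIn (String.ofList [p]) "NRVW") && s != p then false
    else pamLoopA rest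

def matches_pam_py (sequence : String) (pattern : String) : Bool :=
  if PySem.Str.len sequence ≠ PySem.Str.len pattern then false
  else pamLoopA ((PySem.Str.upper sequence).toList.zip pattern.toList)

-- ===== PORT B =====
-- for p, s in zip(pattern, sequence.upper()): groups.setdefault(p, set()).add(s)
-- (setdefault-then-add is exactly Dict.modify with default ∅: groups[p] = groups.get(p, set()) with s added)
def pamGroups (pairs : List (Char × Char)) : PySem.Dict Char (PySem.Set Char) :=
  pairs.foldl (fun d ps => d.modify ps.1 PySem.Set.empty (fun t => PySem.Set.add t ps.2)) PySem.Dict.empty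

-- for p, seen in groups.items(): the elif chain with early returns
def pamCheckGroups : List (Char × PySem.Set Char) → Bool
  | [] => true
  | (p, seen) :: rest =>
    if p == 'R' then
      if !(PySem.Set.issubset seen (PySem.Set.ofList "AG".toList)) then false else pamCheckGroups rest
    else if p == 'V' then
      if !(PySem.Set.issubset seen (PySem.Set.ofList "ACG".toList)) then false else pamCheckGroups rest
    else if !(PySem.Str.isIn (String.ofList [p]) "NW") then
      if !(PySem.Set.equal seen (PySem.Set.ofList [p])) then false else pamCheckGroups rest
    else pamCheckGroups rest

def matches_pam_py_alt (sequence : String) (pattern : String) : Bool :=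
  if PySem.Str.len sequence ≠ PySem.Str.len pattern then false
  else pamCheckGroups (pamGroups (pattern.toList.zip (PySem.Str.upper sequence).toList)).items

-- ===== PRECONDITION & SPEC =====
def Spec_matches_pam_py (sequence : String) (pattern : String) (out : Bool) : Prop := out = matches_pam_py_alt sequence pattern
instance (sequence : String) (pattern : String) (out : Bool) : Decidable (Spec_matches_pam_py sequence pattern out) := by unfold Spec_matches_pam_py; infer_instance

-- ===== CLAIM (what is proved, stated in full; the proofs are below) =====
def Claim_equal_matches_pam_py : Prop := ∀ (sequence : String) (pattern : String), Dom_matches_pam_py sequence pattern → Spec_matches_pam_py sequence pattern (matches_pam_py sequence pattern)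

-- ===== LEMMAS AND PROOFS =====

-- one iteration of A's loop, as a Bool (true = "no early return fired")
def pamStepA (s p : Char) : Bool :=
  if p == 'N' then true
  else if p == 'R' && !(PySem.Str.isIn (String.ofList [s]) "AG") then false
  else if p == 'V' && !(PySem.Str.isIn (String.ofList [s]) "ACG") then false
  else if !(PySem.Str.isIn (String.ofList [p]) "NRVW") && s != p then false
  else true

theorem pamLoopA_cons (s p : Char) (l : List (Char × Char)) :
    pamLoopA ((s, p) :: l) = (pamStepA s p && pamLoopA l) := by
  simp only [pamLoopA, pamStepA]
  split_ifs <;> simp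

theorem pamLoopA_eq_all (l : List (Char × Char)) :
    pamLoopA l = l.all (fun sp => pamStepA sp.1 sp.2) := by
  induction l with
  | nil => rfl
  | cons sp l ih => obtain ⟨s, p⟩ := sp; rw [pamLoopA_cons, List.all_cons, ih]

-- one iteration of B's check loop
def groupOK (p : Char) (seen : PySem.Set Char) : Bool :=
  if p == 'R' then PySem.Set.issubset seen (PySem.Set.ofList "AG".toList)
  else if p == 'V' then PySem.Set.issubset seen (PySem.Set.ofList "ACG".toList)
  else if !(PySem.Str.isIn (String.ofList [p]) "NW") then PySem.Set.equal seen (PySem.Set.ofList [p])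
  else true

theorem pamCheckGroups_cons (p : Char) (seen : PySem.Set Char) (l : List (Char × PySem.Set Char)) :
    pamCheckGroups ((p, seen) :: l) = (groupOK p seen && pamCheckGroups l) := by
  simp only [pamCheckGroups, groupOK]
  split_ifs <;> simp_all

theorem pamCheckGroups_eq_all (l : List (Char × PySem.Set Char)) :
    pamCheckGroups l = l.all (fun ps => groupOK ps.1 ps.2) := by
  induction l with
  | nil => rfl
  | cons ps l ih => obtain ⟨p, seen⟩ := ps; rw [pamCheckGroups_cons, List.all_cons, ih]

-- 's in t' for a single-character s is membership of the character in t
theorem charsIsIn_singleton (c : Char) (l : List Char) :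
    PySem.Chars.isIn [c] l = l.contains c := by
  by_cases hc : c ∈ l
  · have ht : PySem.Chars.isIn [c] l = true := by
      rw [PySem.Chars.isIn_iff_infix]
      obtain ⟨l₁, l₂, hl⟩ := List.append_of_mem hc
      exact ⟨l₁, l₂, by simp [hl]⟩
    simp [ht, hc]
  · have ht : ¬ PySem.Chars.isIn [c] l = true := by
      rw [PySem.Chars.isIn_iff_infix]
      rintro ⟨l₁, l₂, hl⟩
      exact hc (by rw [← hl]; simp)
    rw [Bool.not_eq_true] at ht
    simp [ht, hc]

-- the rule one position must satisfy, as a Prop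
def stepSpec (s p : Char) : Prop :=
  (p = 'R' → s ∈ "AG".toList) ∧ (p = 'V' → s ∈ "ACG".toList) ∧
    (p ∉ (['N', 'R', 'V', 'W'] : List Char) → s = p)

theorem pamStepA_iff (s p : Char) : pamStepA s p = true ↔ stepSpec s p := by
  by_cases hN : p = 'N'
  · subst hN; simp [pamStepA, stepSpec]
  · by_cases hR : p = 'R'
    · subst hR
      simp only [pamStepA, stepSpec]
      rcases h : PySem.Chars.isIn [s] "AG".toList with _ | _ <;>
        simp [charsIsIn_singleton] at h <;>
        simp [charsIsIn_singleton, h]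
    · by_cases hV : p = 'V'
      · subst hV
        simp only [pamStepA, stepSpec]
        rcases h : PySem.Chars.isIn [s] "ACG".toList with _ | _ <;>
          simp [charsIsIn_singleton] at h <;>
          simp [charsIsIn_singleton, h]
      · by_cases hW : p = 'W'
        · subst hW
          constructor
          · intro _
            exact ⟨fun hc => absurd hc (by decide), fun hc => absurd hc (by decide),
              fun hmem => absurd (by simp) hmem⟩
          · intro _
            simp [pamStepA]
            exact Or.inl (by decide)
        · have hmem : PySem.Chars.isIn [p] ['N', 'R', 'V', 'W'] = false := by
            rw [charsIsIn_singleton]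
            simp only [List.contains_eq_mem, List.mem_cons, List.not_mem_nil,
              or_false, decide_eq_false_iff_not]
            tauto
          have hnot : p ∉ (['N', 'R', 'V', 'W'] : List Char) := by
            simp only [List.mem_cons, List.not_mem_nil, or_false]; tauto
          by_cases hsp : s = p
          · subst hsp
            simp [pamStepA, stepSpec, hmem, hN, hR, hV]
          · simp [pamStepA, stepSpec, hmem, hN, hR, hV, hsp, hnot]

theorem groupOK_iff (p : Char) (seen : PySem.Set Char) (hne : ∃ s, s ∈ seen) :
    groupOK p seen = true ↔ ∀ s ∈ seen, stepSpec s p := by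
  by_cases hR : p = 'R'
  · subst hR
    rw [groupOK, if_pos (by decide), PySem.Set.issubset_iff]
    constructor
    · intro h s hs
      refine ⟨fun _ => ?_, fun hv => by simp at hv, fun hmem => absurd (by simp) hmem⟩
      have := h s hs
      rwa [PySem.Set.mem_ofList] at this
    · intro h s hs
      rw [PySem.Set.mem_ofList]
      exact (h s hs).1 rfl
  · by_cases hV : p = 'V'
    · subst hV
      rw [groupOK, if_neg (by decide), if_pos (by decide), PySem.Set.issubset_iff]
      constructor
      · intro h s hs
        refine ⟨fun hr => by simp at hr, fun _ => ?_, fun hmem => absurd (by simp) hmem⟩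
        have := h s hs
        rwa [PySem.Set.mem_ofList] at this
      · intro h s hs
        rw [PySem.Set.mem_ofList]
        exact (h s hs).2.1 rfl
    · by_cases hNW : p = 'N' ∨ p = 'W'
      · have hinC : PySem.Chars.isIn [p] ['N', 'W'] = true := by
          rcases hNW with h | h <;> subst h <;> decide
        rw [groupOK, if_neg (by simp [hR]), if_neg (by simp [hV]), if_neg (by simp [hinC])]
        constructor
        · intro _ s _
          rcases hNW with h | h <;> subst h
          · exact ⟨fun hc => by simp at hc, fun hc => by simp at hc,
              fun hmem => absurd (by simp) hmem⟩
          · exact ⟨fun hc => by simp at hc, fun hc => by simp at hc,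
              fun hmem => absurd (by simp) hmem⟩
        · intro _; rfl
      · rw [not_or] at hNW
        have hinC : PySem.Chars.isIn [p] ['N', 'W'] = false := by
          rw [charsIsIn_singleton]
          simp only [List.contains_eq_mem, decide_eq_false_iff_not]
          intro hmem
          rcases (by simpa using hmem : p = 'N' ∨ p = 'W') with h | h
          · exact hNW.1 h
          · exact hNW.2 h
        have hnot : p ∉ (['N', 'R', 'V', 'W'] : List Char) := by
          simp only [List.mem_cons, List.not_mem_nil, or_false]
          rintro (h | h | h | h)
          exacts [hNW.1 h, hR h, hV h, hNW.2 h]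
        rw [groupOK, if_neg (by simp [hR]), if_neg (by simp [hV]), if_pos (by simp [hinC]),
          PySem.Set.equal_iff]
        constructor
        · intro h s hs
          refine ⟨fun hc => absurd hc hR, fun hc => absurd hc hV, fun _ => ?_⟩
          have := (h s).mp hs
          rwa [PySem.Set.mem_ofList, List.mem_singleton] at this
        · intro h x
          rw [PySem.Set.mem_ofList, List.mem_singleton]
          constructor
          · intro hx; exact (h x hx).2.2 hnot
          · intro hx
            subst hx
            obtain ⟨s, hs⟩ := hne
            have := (h s hs).2.2 hnot
            rwa [this] at hs

-- membership in the groups dict built by the fold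
theorem mem_getD_pamGroupsAux (pairs : List (Char × Char)) (d : PySem.Dict Char (PySem.Set Char))
    (p x : Char) :
    (x ∈ (pairs.foldl (fun d ps => d.modify ps.1 PySem.Set.empty (fun t => PySem.Set.add t ps.2)) d).getD p PySem.Set.empty)
      ↔ x ∈ d.getD p PySem.Set.empty ∨ (p, x) ∈ pairs := by
  induction pairs generalizing d with
  | nil => simp
  | cons qs rest ih =>
    obtain ⟨q, s⟩ := qs
    rw [List.foldl_cons, ih]
    rw [PySem.Dict.getD_modify]
    by_cases hpq : p = q
    · subst hpq
      rw [if_pos rfl, PySem.Set.mem_add]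
      simp only [List.mem_cons, Prod.mk.injEq]
      tauto
    · rw [if_neg hpq]
      simp only [List.mem_cons, Prod.mk.injEq]
      tauto

theorem mem_getD_pamGroups (pairs : List (Char × Char)) (p x : Char) :
    x ∈ (pamGroups pairs).getD p PySem.Set.empty ↔ (p, x) ∈ pairs := by
  rw [pamGroups, mem_getD_pamGroupsAux]
  simp [PySem.Dict.getD_empty, PySem.Set.empty]

theorem keys_pamGroups (pairs : List (Char × Char)) (p : Char) :
    p ∈ (pamGroups pairs).keys ↔ ∃ s, (p, s) ∈ pairs := by
  rw [pamGroups, PySem.Dict.keys_foldl_modify_key, PySem.Dict.keys_empty,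
    PySem.Set.update_nil_left, PySem.Set.mem_ofList]
  constructor
  · intro h
    obtain ⟨⟨q, s⟩, hmem, hq⟩ := List.mem_map.mp h
    exact ⟨s, by simpa [← hq] using hmem⟩
  · rintro ⟨s, hs⟩
    exact List.mem_map.mpr ⟨(p, s), hs, rfl⟩

theorem nodup_keys_pamGroups (pairs : List (Char × Char)) : (pamGroups pairs).keys.Nodup :=
  PySem.Dict.nodup_keys_foldl_modify_key pairs _ _ _ _ PySem.Dict.nodup_keys_empty

-- B's whole computation, characterised over the pairs
theorem alt_true_iff (pairs : List (Char × Char)) :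
    pamCheckGroups (pamGroups pairs).items = true ↔ ∀ p x, (p, x) ∈ pairs → stepSpec x p := by
  rw [pamCheckGroups_eq_all, List.all_eq_true]
  constructor
  · intro h p x hpx
    have hkey : p ∈ (pamGroups pairs).keys := (keys_pamGroups pairs p).mpr ⟨x, hpx⟩
    have hget : ∃ seen, (pamGroups pairs).get? p = some seen := by
      have := PySem.Dict.get?_eq_none_iff_not_mem_keys (d := pamGroups pairs) (k := p)
      rcases hg : (pamGroups pairs).get? p with _ | seen
      · exact absurd (this.mp hg) (by simp [hkey])
      · exact ⟨seen, rfl⟩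
    obtain ⟨seen, hg⟩ := hget
    have hitems : (p, seen) ∈ (pamGroups pairs).items := PySem.Dict.mem_items_of_get?_eq_some _ hg
    have hseen : seen = (pamGroups pairs).getD p PySem.Set.empty := by
      rw [PySem.Dict.getD_eq_get?_getD, hg]; rfl
    have hx : x ∈ seen := by rw [hseen, mem_getD_pamGroups]; exact hpx
    have hok : groupOK p seen = true := h (p, seen) hitems
    exact (groupOK_iff p seen ⟨x, hx⟩).mp hok x hx
  · rintro h ⟨p, seen⟩ hitems
    have hg : (pamGroups pairs).get? p = some seen :=
      PySem.Dict.get?_of_mem_items _ hitems (nodup_keys_pamGroups pairs)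
    have hseen : seen = (pamGroups pairs).getD p PySem.Set.empty := by
      rw [PySem.Dict.getD_eq_get?_getD, hg]; rfl
    have hkey : p ∈ (pamGroups pairs).keys := PySem.Dict.mem_keys_of_mem_items _ hitems
    obtain ⟨s0, hs0⟩ := (keys_pamGroups pairs p).mp hkey
    have hs0' : s0 ∈ seen := by rw [hseen, mem_getD_pamGroups]; exact hs0
    refine (groupOK_iff p seen ⟨s0, hs0'⟩).mpr ?_
    intro s hs
    exact h p s (by rw [hseen, mem_getD_pamGroups] at hs; exact hs)

-- zip in the two orders pairs the same elements
theorem mem_zip_swap {α β : Type} (l : List α) (l' : List β) (a : α) (b : β) :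
    (b, a) ∈ l'.zip l ↔ (a, b) ∈ l.zip l' := by
  rw [← List.zip_swap l l', List.mem_map]
  constructor
  · rintro ⟨⟨u, v⟩, hmem, he⟩
    obtain ⟨h1, h2⟩ : v = b ∧ u = a := by simpa [Prod.ext_iff] using he
    rw [← h1, ← h2]
    exact hmem
  · intro h
    exact ⟨(a, b), h, rfl⟩

-- ===== VERDICT (by name: the statement is the Claim_ definition above) =====
theorem matches_pam_py_spec : Claim_equal_matches_pam_py := by
  intro sequence pattern _
  unfold Spec_matches_pam_py matches_pam_py matches_pam_py_alt
  split_ifs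
  · rfl
  · rw [Bool.eq_iff_iff, pamLoopA_eq_all, List.all_eq_true, alt_true_iff]
    constructor
    · intro h p x hpx
      exact (pamStepA_iff x p).mp
        (h (x, p) ((mem_zip_swap _ _ x p).mp hpx))
    · rintro h ⟨s, p⟩ hmem
      exact (pamStepA_iff s p).mpr (h p s ((mem_zip_swap _ _ s p).mpr hmem))
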